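-- pv_equiv track=rewrite | github.com/Rohith-Kanathur/AssetOpsBench | src/scenarios_evaluation/eval_scenarios.py | _compute_type_diversity_flags
-- ===== SOURCE A (Python) =====
-- from collections import Counter
--
-- _TYPE_DIVERSITY_THRESHOLD = 0.5
--
-- def _compute_type_diversity_flags(scenarios: list[dict]) -> dict[str, bool]:
--     """Return a per-scenario flag: True if this scenario's type does not dominate the dataset."""
--     total = len(scenarios)
--     if total == 0:
--         return {}
--     type_counts = Counter(s.get("type", "").lower() for s in scenarios)
--     dominant_types = {
--         t for t, n in type_counts.items() if n / total > _TYPE_DIVERSITY_THRESHOLD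
--     }
--     return {
--         (s.get("id") or f"<{i}>"): (s.get("type", "").lower() not in dominant_types)
--         for i, s in enumerate(scenarios)
--     }
-- ===== SOURCE B (Python) =====
-- def _compute_type_diversity_flags(scenarios: list[dict]) -> dict[str, bool]:
--     """Return a per-scenario flag: True if this scenario's type does not dominate the dataset."""
--     total = len(scenarios)
--     if total == 0:
--         return {}
--     types = [s.get("type", "").lower() for s in scenarios]
--     # Boyer-Moore majority vote: single candidate + counter instead of a full frequency table
--     cand, votes = None, 0
--     for t in types:
--         if votes == 0:
--             cand, votes = t, 1
--         elif t == cand: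
--             votes += 1
--         else:
--             votes -= 1
--     # verify the candidate really holds a strict majority (> 50%)
--     dominant = cand if 2 * types.count(cand) > total else None
--     return {
--         (s.get("id") or f"<{i}>"): (t != dominant)
--         for i, (s, t) in enumerate(zip(scenarios, types))
--     }
-- ===== Notes on version B (the rewrite author's own statement) =====
-- stated objective: alternative
-- what changed: Replaces the Counter frequency table and dominant-type set comprehension by a Boyer-Moore majority vote (one candidate + integer counter) followed by a single verification count, exploiting that a strict >50% threshold admits at most one dominant type.
import Mathlib
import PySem

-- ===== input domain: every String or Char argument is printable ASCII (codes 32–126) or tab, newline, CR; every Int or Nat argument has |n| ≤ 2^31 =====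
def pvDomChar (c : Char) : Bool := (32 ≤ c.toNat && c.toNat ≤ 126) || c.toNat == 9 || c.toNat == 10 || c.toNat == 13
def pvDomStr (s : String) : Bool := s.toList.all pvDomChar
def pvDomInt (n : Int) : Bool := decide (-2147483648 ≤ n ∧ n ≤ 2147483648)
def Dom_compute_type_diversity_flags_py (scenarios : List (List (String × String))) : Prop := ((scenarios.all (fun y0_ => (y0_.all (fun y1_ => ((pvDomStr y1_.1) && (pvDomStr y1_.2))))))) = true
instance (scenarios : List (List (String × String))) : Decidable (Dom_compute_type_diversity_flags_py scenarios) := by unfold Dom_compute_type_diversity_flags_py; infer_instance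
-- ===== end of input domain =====

-- B replaces A's Counter table + dominant-type set comprehension by a Boyer-Moore majority
-- vote (one candidate + counter) with a single verification count (objective: alternative).

-- ===== PORT A =====
-- s.get("type", "").lower()  (shared accessor: the identical expression occurs in both Pythons)
def pvTypeOf (s : List (String × String)) : String :=
  PySem.Str.lower (PySem.Dict.getD (PySem.Dict.mk s) "type" "")

-- (s.get("id") or f"<{i}>")  — Python 'or': None and "" are falsy (shared, identical in both Pythons)
def pvKeyOf (i : Int) (s : List (String × String)) : String :=
  match PySem.Dict.get? (PySem.Dict.mk s) "id" with
  | some v => if v = "" then "<" ++ PySem.Int.toStr i ++ ">" else v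
  | none => "<" ++ PySem.Int.toStr i ++ ">"

def compute_type_diversity_flags_py (scenarios : List (List (String × String))) : List (String × Bool) :=
  let total : Int := scenarios.length
  if total = 0 then []
  else
    let type_counts : PySem.Dict String Int :=
      PySem.Dict.counter (scenarios.map pvTypeOf)
    -- n / total > 0.5 (true float division): exact as 2 * n > total (0.5 is an exact double
    -- and with 0 < total ≤ n ≤ 2^31 the rounded quotient is on the same side of 0.5)
    let dominant_types : PySem.Set String :=
      PySem.Set.ofList ((type_counts.items.filter (fun p => decide (2 * p.2 > total))).map Prod.fst)
    ((PySem.List.enumerate scenarios).foldl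
      (fun (d : PySem.Dict String Bool) p =>
        d.insert (pvKeyOf p.1 p.2) (! PySem.Set.contains dominant_types (pvTypeOf p.2)))
      PySem.Dict.empty).items

-- ===== PORT B =====
-- one Boyer-Moore vote step: on votes == 0 adopt t, on match increment, else decrement
def pvVoteStep (st : Option String × Int) (t : String) : Option String × Int :=
  if st.2 = 0 then (some t, 1)
  else if some t = st.1 then (st.1, st.2 + 1)
  else (st.1, st.2 - 1)

def compute_type_diversity_flags_py_alt (scenarios : List (List (String × String))) : List (String × Bool) :=
  let total : Int := scenarios.length
  if total = 0 then []
  else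
    let types := scenarios.map pvTypeOf
    let vote := types.foldl pvVoteStep ((none : Option String), (0 : Int))
    let dominant : Option String :=
      match vote.1 with
      | some c => if 2 * (types.count c : Int) > total then some c else none
      | none => none
    ((PySem.List.enumerate (scenarios.zip types)).foldl
      (fun (d : PySem.Dict String Bool) p =>
        d.insert (pvKeyOf p.1 p.2.1) (decide (some p.2.2 ≠ dominant)))
      PySem.Dict.empty).items

-- ===== PRECONDITION & SPEC =====
def Spec_compute_type_diversity_flags_py (scenarios : List (List (String × String))) (out : List (String × Bool)) : Prop := out = compute_type_diversity_flags_py_alt scenarios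
instance (scenarios : List (List (String × String))) (out : List (String × Bool)) : Decidable (Spec_compute_type_diversity_flags_py scenarios out) := by unfold Spec_compute_type_diversity_flags_py; infer_instance

-- ===== CLAIM (what is proved, stated in full; the proofs are below) =====
def Claim_equal_compute_type_diversity_flags_py : Prop := ∀ (scenarios : List (List (String × String))), Dom_compute_type_diversity_flags_py scenarios → Spec_compute_type_diversity_flags_py scenarios (compute_type_diversity_flags_py scenarios)

-- ===== LEMMAS AND PROOFS =====

-- Boyer-Moore invariant: votes stay nonnegative, and for every x the doubled count of x in the
-- processed list is bounded by length + votes if x is the candidate, length - votes otherwise.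
theorem pv_bm_inv (l : List String) : ∀ (c : Option String) (k : Int), 0 ≤ k → ∀ x : String,
    0 ≤ (l.foldl pvVoteStep (c, k)).2 ∧
    2 * (l.count x : Int) + (if some x = c then k else -k) ≤
      (l.length : Int) +
        (if some x = (l.foldl pvVoteStep (c, k)).1 then (l.foldl pvVoteStep (c, k)).2
         else -(l.foldl pvVoteStep (c, k)).2) := by
  induction l with
  | nil =>
    intro c k hk x
    refine ⟨by simpa using hk, ?_⟩
    simp only [List.foldl_nil, List.count_nil, Nat.cast_zero, List.length_nil]
    split <;> omega
  | cons t l ih =>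
    intro c k hk x
    have hcount : ((t :: l).count x : Int) = (l.count x : Int) + (if x = t then 1 else 0) := by
      rw [List.count_cons]
      by_cases hxt : x = t
      · simp [hxt]
      · have h' : ¬ t = x := fun h => hxt h.symm
        simp [hxt, h']
    simp only [List.foldl_cons, List.length_cons]
    rcases Decidable.em (k = 0) with h0 | h0
    · have hstep : pvVoteStep (c, k) t = (some t, 1) := by simp [pvVoteStep, h0]
      rw [hstep]
      obtain ⟨h1, h2⟩ := ih (some t) 1 (by omega) x
      refine ⟨h1, ?_⟩
      rw [hcount]
      have key : 2 * (if x = t then (1 : Int) else 0) + (if some x = c then k else -k) ≤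
          1 + (if some x = some t then (1 : Int) else -1) := by
        clear ih h1 h2 hcount hstep
        split_ifs <;> first | omega | simp_all
      push_cast at h2 ⊢
      linarith [key, h2]
    · rcases Decidable.em (some t = c) with hc | hc
      · have hstep : pvVoteStep (c, k) t = (c, k + 1) := by simp [pvVoteStep, h0, hc]
        rw [hstep]
        obtain ⟨h1, h2⟩ := ih c (k + 1) (by omega) x
        refine ⟨h1, ?_⟩
        rw [hcount]
        have key : 2 * (if x = t then (1 : Int) else 0) + (if some x = c then k else -k) ≤
            1 + (if some x = c then k + 1 else -(k + 1)) := by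
          clear ih h1 h2 hcount hstep
          split_ifs <;> first | omega | simp_all
        push_cast at h2 ⊢
        linarith [key, h2]
      · have hstep : pvVoteStep (c, k) t = (c, k - 1) := by simp [pvVoteStep, h0, hc]
        rw [hstep]
        obtain ⟨h1, h2⟩ := ih c (k - 1) (by omega) x
        refine ⟨h1, ?_⟩
        rw [hcount]
        have key : 2 * (if x = t then (1 : Int) else 0) + (if some x = c then k else -k) ≤
            1 + (if some x = c then k - 1 else -(k - 1)) := by
          clear ih h1 h2 hcount hstep
          split_ifs <;> first | omega | simp_all
        push_cast at h2 ⊢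
        linarith [key, h2]

-- a strict majority element is the final Boyer-Moore candidate
theorem pv_bm_majority (l : List String) (x : String)
    (h : 2 * (l.count x : Int) > (l.length : Int)) :
    (l.foldl pvVoteStep ((none : Option String), (0 : Int))).1 = some x := by
  obtain ⟨h1, h2⟩ := pv_bm_inv l none 0 le_rfl x
  by_contra hne
  have : ¬ (some x = (l.foldl pvVoteStep ((none : Option String), (0 : Int))).1) := fun h' => hne h'.symm
  simp [this] at h2
  omega

-- the dominant Option of B agrees with membership in 2·count > total
theorem pv_dominant_iff (types : List String) (tl : String)
    (dom : Option String)
    (hdom : dom = match (types.foldl pvVoteStep ((none : Option String), (0 : Int))).1 with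
      | some c => if 2 * (types.count c : Int) > (types.length : Int) then some c else none
      | none => none) :
    (some tl = dom) ↔ 2 * (types.count tl : Int) > (types.length : Int) := by
  constructor
  · intro h
    rw [hdom] at h
    rcases hv : (types.foldl pvVoteStep ((none : Option String), (0 : Int))).1 with _ | c
    · rw [hv] at h; simp at h
    · rw [hv] at h
      by_cases hc : 2 * (types.count c : Int) > (types.length : Int)
      · simp [hc] at h; rw [h]; exact hc
      · simp [hc] at h
  · intro h
    have hcand := pv_bm_majority types tl h
    rw [hdom, hcand]
    simp [h]

-- the two per-scenario flag computations coincide when membership matches the option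
theorem pv_folds_eq (ds : PySem.Set String) (dom : Option String)
    (hflag : ∀ tl, (! PySem.Set.contains ds tl) = decide (some tl ≠ dom)) :
    ∀ (sc : List (List (String × String))) (i : Int) (d : PySem.Dict String Bool),
    ((PySem.List.enumerate sc i).foldl
        (fun (d : PySem.Dict String Bool) p =>
          d.insert (pvKeyOf p.1 p.2) (! PySem.Set.contains ds (pvTypeOf p.2))) d)
    = ((PySem.List.enumerate (sc.zip (sc.map pvTypeOf)) i).foldl
        (fun (d : PySem.Dict String Bool) p =>
          d.insert (pvKeyOf p.1 p.2.1) (decide (some p.2.2 ≠ dom))) d) := by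
  intro sc
  induction sc with
  | nil => intro i d; rfl
  | cons s sc ih =>
    intro i d
    simp only [List.map_cons, List.zip_cons_cons, PySem.List.enumerate_cons, List.foldl_cons]
    rw [hflag (pvTypeOf s)]
    exact ih (i + 1) _

-- membership in A's dominant_types set is exactly 2·count > total
theorem pv_mem_dominant_set (types : List String) (tl : String) (total : Int)
    (htotal : total = (types.length : Int)) :
    PySem.Set.contains
      (PySem.Set.ofList
        (((PySem.Dict.counter types).items.filter (fun p => decide (2 * p.2 > total))).map Prod.fst))
      tl
    = decide (2 * (types.count tl : Int) > total) := by
  rw [PySem.Dict.items_counter]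
  rw [show PySem.Set.contains
      (PySem.Set.ofList
        ((((PySem.Set.ofList types).map (fun k => (k, (types.count k : Int)))).filter
          (fun p => decide (2 * p.2 > total))).map Prod.fst)) tl
    = decide (tl ∈ (PySem.Set.ofList
        ((((PySem.Set.ofList types).map (fun k => (k, (types.count k : Int)))).filter
          (fun p => decide (2 * p.2 > total))).map Prod.fst))) from by
      simp [PySem.Set.contains]]
  rw [decide_eq_decide]
  rw [PySem.Set.mem_ofList]
  constructor
  · intro h
    simp only [List.mem_map, List.mem_filter, decide_eq_true_eq] at h
    obtain ⟨p, ⟨⟨k, hk, rfl⟩, hgt⟩, rfl⟩ := h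
    exact hgt
  · intro h
    simp only [List.mem_map, List.mem_filter, decide_eq_true_eq]
    have hmem : tl ∈ types := by
      have hpos : 0 < types.count tl := by
        by_contra hcn
        have hz : types.count tl = 0 := by omega
        rw [hz] at h
        simp at h
        omega
      exact List.count_pos_iff.mp hpos
    exact ⟨(tl, (types.count tl : Int)),
      ⟨⟨tl, (PySem.Set.mem_ofList types tl).mpr hmem, rfl⟩, h⟩, rfl⟩

-- ===== VERDICT (by name: the statement is the Claim_ definition above) =====
theorem compute_type_diversity_flags_py_spec : Claim_equal_compute_type_diversity_flags_py := by
  intro scenarios _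
  unfold Spec_compute_type_diversity_flags_py
  unfold compute_type_diversity_flags_py compute_type_diversity_flags_py_alt
  by_cases h0 : (scenarios.length : Int) = 0
  · simp [h0]
  · simp only [if_neg h0]
    apply congrArg PySem.Dict.items
    apply pv_folds_eq
    intro tl
    rw [pv_mem_dominant_set (scenarios.map pvTypeOf) tl (scenarios.length : Int) (by simp)]
    have hiff := pv_dominant_iff (scenarios.map pvTypeOf) tl _ rfl
    simp only [List.length_map] at hiff ⊢
    by_cases hd : 2 * ((scenarios.map pvTypeOf).count tl : Int) > (scenarios.length : Int)
    · simp [hd, hiff.mpr hd]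
    · have : ¬ (some tl = _) := fun h => hd (hiff.mp h)
      simp [hd, this]
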